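-- pv_equiv track=rewrite | github.com/Maheshkumarcseb/visualize-your-sorting | app.py | quick_sort_steps
-- ===== SOURCE A (Python) =====
-- import copy
--
-- def quick_sort_steps(arr):
--     steps = []
--     def quick_sort(arr, low, high):
--         if low<high:
--             pi = partition(arr, low, high)
--             quick_sort(arr, low, pi-1)
--             quick_sort(arr, pi+1, high)
--
--     def partition(arr, low, high):
--         pivot = arr[high]
--         i = low - 1
--         for j in range(low, high):
--             steps.append((copy.deepcopy(arr), [j, high]))
--             if arr[j]<pivot:
--                 i+=1
--                 arr[i], arr[j]=arr[j], arr[i]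
--                 steps.append((copy.deepcopy(arr), [i, j]))
--         arr[i+1], arr[high]=arr[high], arr[i+1]
--         steps.append((copy.deepcopy(arr), [i+1, high]))
--         return i+1
--
--     quick_sort(arr,0,len(arr)-1)
--     steps.append((copy.deepcopy(arr), []))
--     return steps
-- ===== SOURCE B (Python) =====
-- import copy
--
-- def quick_sort_steps(arr):
--     def partition(a, low, high):
--         # pure: returns (new list, pivot index, local step records)
--         a = list(a)
--         pivot = a[high]
--         i = low - 1
--         out = []
--         j = low
--         while j < high:
--             out.append((copy.deepcopy(a), [j, high]))
--             if a[j] < pivot: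
--                 i += 1
--                 a[i], a[j] = a[j], a[i]
--                 out.append((copy.deepcopy(a), [i, j]))
--             j += 1
--         a[i+1], a[high] = a[high], a[i+1]
--         out.append((copy.deepcopy(a), [i+1, high]))
--         return a, i + 1, out
--
--     def sort(a, low, high):
--         # pure: returns (list sorted on [low,high], steps of this range)
--         if low >= high:
--             return a, []
--         a, pi, s0 = partition(a, low, high)
--         a, s1 = sort(a, low, pi - 1)
--         a, s2 = sort(a, pi + 1, high)
--         return a, s0 + s1 + s2
--
--     final, steps = sort(list(arr), 0, len(arr) - 1)
--     return steps + [(final, [])]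
-- ===== Notes on version B (the rewrite author's own statement) =====
-- stated objective: alternative
-- what changed: A threads one shared mutable steps list through an in-place recursive quicksort; B is a pure compositional rewrite: partition is a while-loop over a copied list returning its own local step list, the recursive driver returns (array, steps) and concatenates partition-steps ++ left-steps ++ right-steps, and the input list is never mutated.
import Mathlib
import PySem

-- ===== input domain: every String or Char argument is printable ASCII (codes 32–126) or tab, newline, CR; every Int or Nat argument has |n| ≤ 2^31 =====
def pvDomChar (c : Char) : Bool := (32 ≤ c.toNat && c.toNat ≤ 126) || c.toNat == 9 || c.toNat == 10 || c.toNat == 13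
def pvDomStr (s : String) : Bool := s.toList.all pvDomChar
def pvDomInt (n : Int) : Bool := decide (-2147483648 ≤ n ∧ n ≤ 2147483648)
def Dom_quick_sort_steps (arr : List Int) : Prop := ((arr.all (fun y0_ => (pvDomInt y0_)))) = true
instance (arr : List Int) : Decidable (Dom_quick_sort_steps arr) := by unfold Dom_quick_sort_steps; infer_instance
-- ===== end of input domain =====

-- B is a pure compositional rewrite of A: partition is a while-loop over a copied list that
-- returns its own local step list, and the driver concatenates the step lists; return value
-- only — Python A sorts `arr` in place while B never mutates it.

-- ===== PORT A =====
-- arr[i] for an index the algorithm keeps in range (the driver only calls partition with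
-- 0 ≤ low < high < len, so every access is in range and the default is never taken).
def pvIdx (arr : List Int) (i : Int) : Int := (PySem.List.pyGet? arr i).getD 0
-- arr[i] = v for an in-range nonnegative index (same remark).
def pvSet (arr : List Int) (i : Int) (v : Int) : List Int := arr.set i.toNat v

-- A's `partition(arr, low, high)`: returns (new arr, new steps, pi);
-- steps.append is modelled by threading the steps list through.
def pvPartition (arr : List Int) (low high : Int) (steps : List (List Int × List Int)) :
    List Int × List (List Int × List Int) × Int :=
  let pivot := pvIdx arr high
  let st := (PySem.List.pyRange low high 1).foldl
    (fun (st : List Int × Int × List (List Int × List Int)) j =>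
      let arr := st.1; let i := st.2.1
      let steps := st.2.2 ++ [(arr, [j, high])]
      if pvIdx arr j < pivot then
        let i := i + 1
        let arr' := pvSet (pvSet arr i (pvIdx arr j)) j (pvIdx arr i)
        (arr', i, steps ++ [(arr', [i, j])])
      else (arr, i, steps))
    (arr, low - 1, steps)
  let arr := st.1; let i := st.2.1
  let arr' := pvSet (pvSet arr (i+1) (pvIdx arr high)) high (pvIdx arr (i+1))
  (arr', st.2.2 ++ [(arr', [i+1, high])], i + 1)

-- the recursive driver `quick_sort(arr, low, high)` of A, arr and steps threaded;
-- `fuel` only makes the recursion structural: arr.length + 1 is always enough.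
def pvQSF (fuel : Nat) (arr : List Int) (steps : List (List Int × List Int))
    (low high : Int) : List Int × List (List Int × List Int) :=
  match fuel with
  | 0 => (arr, steps)
  | fuel + 1 =>
    if low < high then
      let p := pvPartition arr low high steps
      let q := pvQSF fuel p.1 p.2.1 low (p.2.2 - 1)
      pvQSF fuel q.1 q.2 (p.2.2 + 1) high
    else (arr, steps)

def quick_sort_steps (arr : List Int) : List (List Int × List Int) :=
  let r := pvQSF (arr.length + 1) arr [] 0 ((arr.length : Int) - 1)
  r.2 ++ [(r.1, [])]

-- ===== PORT B =====
-- a[i] and the simultaneous swap assignment of Source B (indices in range, as for A)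
def pvGetB (a : List Int) (i : Int) : Int := (PySem.List.pyGet? a i).getD 0
def pvSwapB (a : List Int) (i j : Int) : List Int :=
  (a.set i.toNat (pvGetB a j)).set j.toNat (pvGetB a i)

-- the `while j < high` loop of B's partition, recursion on the remaining count
-- (high - j).toNat; state (a, i), returns (a, i, local steps of the loop)
def pvPartLoopB (pivot high : Int) (cnt : Nat) (j i : Int) (a : List Int) :
    List Int × Int × List (List Int × List Int) :=
  match cnt with
  | 0 => (a, i, [])
  | c + 1 =>
    if pvGetB a j < pivot then
      let a' := pvSwapB a (i + 1) j
      let r := pvPartLoopB pivot high c (j + 1) (i + 1) a'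
      (r.1, r.2.1, (a, [j, high]) :: (a', [i + 1, j]) :: r.2.2)
    else
      let r := pvPartLoopB pivot high c (j + 1) i a
      (r.1, r.2.1, (a, [j, high]) :: r.2.2)

-- B's pure partition: (new list, pivot index, local step records)
def pvPartB (a : List Int) (low high : Int) : List Int × Int × List (List Int × List Int) :=
  let r := pvPartLoopB (pvGetB a high) high (high - low).toNat low (low - 1) a
  let a' := pvSwapB r.1 (r.2.1 + 1) high
  (a', r.2.1 + 1, r.2.2 ++ [(a', [r.2.1 + 1, high])])

-- B's pure recursive `sort(a, low, high)`, fuel for structural recursion (length + 1 suffices)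
def pvSortB (fuel : Nat) (a : List Int) (low high : Int) :
    List Int × List (List Int × List Int) :=
  match fuel with
  | 0 => (a, [])
  | fuel + 1 =>
    if low ≥ high then (a, [])
    else
      let p := pvPartB a low high
      let l := pvSortB fuel p.1 low (p.2.1 - 1)
      let r := pvSortB fuel l.1 (p.2.1 + 1) high
      (r.1, p.2.2 ++ (l.2 ++ r.2))

def quick_sort_steps_alt (arr : List Int) : List (List Int × List Int) :=
  let r := pvSortB (arr.length + 1) arr 0 ((arr.length : Int) - 1)
  r.2 ++ [(r.1, [])]

-- ===== PRECONDITION & SPEC =====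
def Spec_quick_sort_steps (arr : List Int) (out : List (List Int × List Int)) : Prop := out = quick_sort_steps_alt arr
instance (arr : List Int) (out : List (List Int × List Int)) : Decidable (Spec_quick_sort_steps arr out) := by unfold Spec_quick_sort_steps; infer_instance

-- ===== CLAIM =====
def Claim_equal_quick_sort_steps : Prop := ∀ (arr : List Int), Dom_quick_sort_steps arr → Spec_quick_sort_steps arr (quick_sort_steps arr)

-- ===== LEMMAS AND PROOFS =====

-- A's partition fold over range(low, high) is B's while-loop recursion, with the
-- accumulated steps prefix pulled out in front of B's local step list.
theorem part_loop_eq (pivot high : Int) : ∀ (cnt : Nat) (low i : Int) (a : List Int)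
    (steps : List (List Int × List Int)), (high - low).toNat = cnt →
    (PySem.List.pyRange low high 1).foldl
      (fun (st : List Int × Int × List (List Int × List Int)) j =>
        let arr := st.1; let i := st.2.1
        let steps := st.2.2 ++ [(arr, [j, high])]
        if pvIdx arr j < pivot then
          let i := i + 1
          let arr' := pvSet (pvSet arr i (pvIdx arr j)) j (pvIdx arr i)
          (arr', i, steps ++ [(arr', [i, j])])
        else (arr, i, steps))
      (a, i, steps)
    = ((pvPartLoopB pivot high cnt low i a).1,
       (pvPartLoopB pivot high cnt low i a).2.1,
       steps ++ (pvPartLoopB pivot high cnt low i a).2.2) := by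
  intro cnt
  induction cnt with
  | zero =>
    intro low i a steps h
    rw [PySem.List.pyRange_one_eq_nil (by omega)]
    simp [pvPartLoopB]
  | succ c ih =>
    intro low i a steps h
    rw [PySem.List.pyRange_one_cons (by omega)]
    simp only [List.foldl_cons]
    by_cases hc : pvIdx a low < pivot
    · simp only [hc, if_pos, pvPartLoopB]
      have hg : pvGetB a low < pivot := hc
      rw [if_pos hg]
      rw [ih (low + 1) (i + 1) _ _ (by omega)]
      simp [pvSwapB, pvSet, pvGetB, pvIdx]
    · simp only [pvPartLoopB]
      rw [if_neg hc]
      have hg : ¬ pvGetB a low < pivot := hc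
      rw [if_neg hg]
      rw [ih (low + 1) i _ _ (by omega)]
      simp

-- A's partition is B's partition with the steps prefix in front
theorem partition_eq (a : List Int) (low high : Int) (steps : List (List Int × List Int)) :
    pvPartition a low high steps
      = ((pvPartB a low high).1, steps ++ (pvPartB a low high).2.2, (pvPartB a low high).2.1) := by
  simp only [pvPartition, pvPartB]
  rw [part_loop_eq (pvIdx a high) high (high - low).toNat low (low - 1) a steps rfl]
  simp [pvSwapB, pvSet, pvGetB, pvIdx]

-- A's driver threads steps; B's driver returns its own steps: same fuel, same result
theorem driver_eq : ∀ (fuel : Nat) (a : List Int) (steps : List (List Int × List Int))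
    (low high : Int),
    pvQSF fuel a steps low high
      = ((pvSortB fuel a low high).1, steps ++ (pvSortB fuel a low high).2) := by
  intro fuel
  induction fuel with
  | zero => intro a steps low high; simp [pvQSF, pvSortB]
  | succ f ih =>
    intro a steps low high
    by_cases h : low < high
    · simp only [pvQSF, pvSortB, if_pos h, if_neg (by omega : ¬ low ≥ high)]
      rw [partition_eq]
      simp only
      rw [ih, ih]
      simp
    · simp [pvQSF, pvSortB, h, (by omega : low ≥ high)]

-- ===== VERDICT =====
theorem quick_sort_steps_spec : Claim_equal_quick_sort_steps := by
  intro arr _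
  unfold Spec_quick_sort_steps quick_sort_steps quick_sort_steps_alt
  rw [driver_eq]
  simp
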